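-- pv_equiv track=rewrite | github.com/Shrutishrma/Nutrix-AI-Smart-Dietary-Lifestyle-Assistant | backend/geoapify_logic.py | _get_dish_keywords
-- ===== SOURCE A (Python) =====
-- def _get_dish_keywords(dish: str) -> list:
--     """Return search keyword variants for venue name matching."""
--     d = dish.lower().strip()
--     keywords = []
--     # Tea → search for cafe / tea / chai
--     if any(x in d for x in ["tea", "chai"]):
--         keywords = ["tea", "cafe", "chai", "coffee", "brew", "cup"]
--     elif any(x in d for x in ["idli", "dosa", "upma", "vada", "sambar"]):
--         keywords = ["udupi", "south indian", "darshini", "tiffin", "breakfast", "idli", "dosa"]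
--     elif any(x in d for x in ["khichdi", "dal", "rice", "poha", "daliya"]):
--         keywords = ["home", "tiffin", "meals", "lunch", "kitchen", "sagar", "darshini"]
--     elif any(x in d for x in ["juice", "lassi", "buttermilk", "smoothie", "coconut"]):
--         keywords = ["juice", "fresh", "cafe", "drinks", "beverages"]
--     elif any(x in d for x in ["soup", "salad"]):
--         keywords = ["healthy", "cafe", "kitchen", "bowl", "fresh"]
--     return keywords
-- ===== SOURCE B (Python) =====
-- # Flat trigger->group map; full scan taking the MINIMUM group index of all
-- # matching triggers (no ordered branch dispatch, no early exit).
-- TRIGGER_GROUP = [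
--     ("tea", 0), ("chai", 0),
--     ("idli", 1), ("dosa", 1), ("upma", 1), ("vada", 1), ("sambar", 1),
--     ("khichdi", 2), ("dal", 2), ("rice", 2), ("poha", 2), ("daliya", 2),
--     ("juice", 3), ("lassi", 3), ("buttermilk", 3), ("smoothie", 3), ("coconut", 3),
--     ("soup", 4), ("salad", 4),
-- ]
--
-- GROUP_KEYWORDS = [
--     ["tea", "cafe", "chai", "coffee", "brew", "cup"],
--     ["udupi", "south indian", "darshini", "tiffin", "breakfast", "idli", "dosa"],
--     ["home", "tiffin", "meals", "lunch", "kitchen", "sagar", "darshini"],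
--     ["juice", "fresh", "cafe", "drinks", "beverages"],
--     ["healthy", "cafe", "kitchen", "bowl", "fresh"],
-- ]
--
--
-- def _get_dish_keywords(dish: str) -> list:
--     """Return search keyword variants for venue name matching."""
--     d = dish.lower().strip()
--     best = None
--     for t, i in TRIGGER_GROUP:
--         if t in d and (best is None or i < best):
--             best = i
--     return GROUP_KEYWORDS[best] if best is not None else []
-- ===== Notes on version B (the rewrite author's own statement) =====
-- stated objective: alternative
-- what changed: Replaces the five ordered if/elif branch tests with a single full scan over a flat trigger-to-group map that aggregates the minimum group index of all matching triggers, then indexes a keyword table (first-match-wins becomes min-index aggregation).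
import Mathlib
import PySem

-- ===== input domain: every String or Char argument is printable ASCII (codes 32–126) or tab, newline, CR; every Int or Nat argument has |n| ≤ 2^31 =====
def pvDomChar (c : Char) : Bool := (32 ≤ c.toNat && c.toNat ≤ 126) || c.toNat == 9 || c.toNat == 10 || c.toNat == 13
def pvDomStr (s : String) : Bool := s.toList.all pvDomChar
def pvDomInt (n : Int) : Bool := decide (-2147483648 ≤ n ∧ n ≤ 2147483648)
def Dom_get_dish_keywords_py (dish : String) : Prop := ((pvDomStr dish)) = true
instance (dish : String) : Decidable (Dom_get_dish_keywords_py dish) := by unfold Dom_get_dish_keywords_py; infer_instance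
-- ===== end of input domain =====

-- B replaces A's ordered if/elif dispatch with a full scan over a flat trigger->group map
-- aggregating the minimum matching group index, then a table lookup (alternative, same cost).


-- ===== PORT A =====
def get_dish_keywords_py (dish : String) : List String :=
  let d := PySem.Str.strip (PySem.Str.lower dish)
  let keywords : List String := []
  if ["tea", "chai"].any (fun x => PySem.Str.isIn x d) then
    ["tea", "cafe", "chai", "coffee", "brew", "cup"]
  else if ["idli", "dosa", "upma", "vada", "sambar"].any (fun x => PySem.Str.isIn x d) then
    ["udupi", "south indian", "darshini", "tiffin", "breakfast", "idli", "dosa"]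
  else if ["khichdi", "dal", "rice", "poha", "daliya"].any (fun x => PySem.Str.isIn x d) then
    ["home", "tiffin", "meals", "lunch", "kitchen", "sagar", "darshini"]
  else if ["juice", "lassi", "buttermilk", "smoothie", "coconut"].any (fun x => PySem.Str.isIn x d) then
    ["juice", "fresh", "cafe", "drinks", "beverages"]
  else if ["soup", "salad"].any (fun x => PySem.Str.isIn x d) then
    ["healthy", "cafe", "kitchen", "bowl", "fresh"]
  else keywords

-- ===== PORT B =====
def pvTriggerGroup : List (String × Nat) :=
  [ ("tea", 0), ("chai", 0),
    ("idli", 1), ("dosa", 1), ("upma", 1), ("vada", 1), ("sambar", 1),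
    ("khichdi", 2), ("dal", 2), ("rice", 2), ("poha", 2), ("daliya", 2),
    ("juice", 3), ("lassi", 3), ("buttermilk", 3), ("smoothie", 3), ("coconut", 3),
    ("soup", 4), ("salad", 4) ]

def pvGroupKeywords : List (List String) :=
  [ ["tea", "cafe", "chai", "coffee", "brew", "cup"],
    ["udupi", "south indian", "darshini", "tiffin", "breakfast", "idli", "dosa"],
    ["home", "tiffin", "meals", "lunch", "kitchen", "sagar", "darshini"],
    ["juice", "fresh", "cafe", "drinks", "beverages"],
    ["healthy", "cafe", "kitchen", "bowl", "fresh"] ]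

-- the 'for t, i in TRIGGER_GROUP: if t in d and (best is None or i < best): best = i' loop
def get_dish_keywords_py_alt (dish : String) : List String :=
  let d := PySem.Str.strip (PySem.Str.lower dish)
  let best : Option Nat :=
    pvTriggerGroup.foldl
      (fun best p =>
        if PySem.Str.isIn p.1 d && (best.isNone || decide (p.2 < best.getD 0)) then
          some p.2
        else best)
      none
  match best with
  | some i => pvGroupKeywords.getD i []
  | none => []

-- ===== PRECONDITION & SPEC =====
def Spec_get_dish_keywords_py (dish : String) (out : List String) : Prop := out = get_dish_keywords_py_alt dish
instance (dish : String) (out : List String) : Decidable (Spec_get_dish_keywords_py dish out) := by unfold Spec_get_dish_keywords_py; infer_instance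

-- ===== CLAIM =====
def Claim_equal_get_dish_keywords_py : Prop := ∀ (dish : String), Dom_get_dish_keywords_py dish → Spec_get_dish_keywords_py dish (get_dish_keywords_py dish)

-- ===== LEMMAS AND PROOFS =====

-- ===== VERDICT =====
set_option maxHeartbeats 2000000 in
theorem get_dish_keywords_py_spec : Claim_equal_get_dish_keywords_py := by
  intro dish _
  unfold Spec_get_dish_keywords_py get_dish_keywords_py get_dish_keywords_py_alt pvTriggerGroup pvGroupKeywords
  set d := PySem.Str.strip (PySem.Str.lower dish) with hd
  by_cases h1 : PySem.Str.isIn "tea" d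
  · simp_all
  by_cases h2 : PySem.Str.isIn "chai" d
  · simp_all
  by_cases h3 : PySem.Str.isIn "idli" d
  · simp_all
  by_cases h4 : PySem.Str.isIn "dosa" d
  · simp_all
  by_cases h5 : PySem.Str.isIn "upma" d
  · simp_all
  by_cases h6 : PySem.Str.isIn "vada" d
  · simp_all
  by_cases h7 : PySem.Str.isIn "sambar" d
  · simp_all
  by_cases h8 : PySem.Str.isIn "khichdi" d
  · simp_all
  by_cases h9 : PySem.Str.isIn "dal" d
  · simp_all
  by_cases h10 : PySem.Str.isIn "rice" d
  · simp_all
  by_cases h11 : PySem.Str.isIn "poha" d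
  · simp_all
  by_cases h12 : PySem.Str.isIn "daliya" d
  · simp_all
  by_cases h13 : PySem.Str.isIn "juice" d
  · simp_all
  by_cases h14 : PySem.Str.isIn "lassi" d
  · simp_all
  by_cases h15 : PySem.Str.isIn "buttermilk" d
  · simp_all
  by_cases h16 : PySem.Str.isIn "smoothie" d
  · simp_all
  by_cases h17 : PySem.Str.isIn "coconut" d
  · simp_all
  by_cases h18 : PySem.Str.isIn "soup" d
  · simp_all
  by_cases h19 : PySem.Str.isIn "salad" d
  · simp_all
  simp_all
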